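-- pv_equiv track=rewrite | github.com/wecliqued/deep_learning | repsly_challenge/functions.py | class_replacement
-- ===== SOURCE A (Python) =====
-- def class_replacement(classArray):
--     newArray = []
--     for i in classArray:
--         if len(newArray) == 0:
--             newArray.append(i)
--         else:
--             exists = 0
--             for j in newArray:
--                 if i == j:
--                     exists=1
--             if exists == 0:
--                 newArray.append(i)
--     numColumns = len(newArray)
--     map = {}
--     for x in range(numColumns):
--         val = 10**x
--         map[newArray[x]] = val
--     return map
-- ===== SOURCE B (Python) =====
-- def class_replacement(classArray):
--     # Map each value to the index of its first occurrence, then order the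
--     # distinct values by that index and assign powers of ten by rank.
--     first = {}
--     for idx, v in enumerate(classArray):
--         first.setdefault(v, idx)
--     order = sorted(first, key=first.get)
--     return {v: 10 ** e for e, v in enumerate(order)}
-- ===== Notes on version B (the rewrite author's own statement) =====
-- stated objective: faster
-- what changed: B replaces A's two phases (nested-loop dedup into a list, then an indexed loop assigning powers of ten) with a first-occurrence-index map built by setdefault, a sort of the distinct values by that index, and a rank-indexed dict comprehension.
import Mathlib
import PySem

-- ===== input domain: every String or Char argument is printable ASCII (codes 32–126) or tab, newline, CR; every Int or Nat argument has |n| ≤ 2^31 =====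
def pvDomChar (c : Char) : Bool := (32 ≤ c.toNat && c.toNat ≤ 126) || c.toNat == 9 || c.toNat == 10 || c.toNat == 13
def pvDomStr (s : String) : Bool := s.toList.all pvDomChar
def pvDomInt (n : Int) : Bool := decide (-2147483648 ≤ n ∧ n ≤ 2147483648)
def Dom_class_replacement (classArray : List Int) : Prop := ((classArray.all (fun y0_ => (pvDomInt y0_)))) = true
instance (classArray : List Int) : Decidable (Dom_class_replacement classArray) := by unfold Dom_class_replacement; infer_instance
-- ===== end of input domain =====

-- B replaces A's nested-loop dedup + indexed power loop by a first-occurrence-index map,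
-- a sort of the distinct values by that index, and a rank-indexed comprehension. Return-value equivalence.

-- ===== PORT A =====
-- one step of A's outer dedup loop (the inner 'for j' loop is the foldl computing the exists flag)
def pvStepA (newArray : List Int) (i : Int) : List Int :=
  if newArray.length == 0 then newArray ++ [i]
  else
    let ex : Int := newArray.foldl (fun e j => if i == j then 1 else e) 0
    if ex == 0 then newArray ++ [i] else newArray

def class_replacement (classArray : List Int) : List (Int × Int) :=
  let newArray := classArray.foldl pvStepA []
  let numColumns := newArray.length
  let m := (PySem.List.pyRange 0 (numColumns : Int) 1).foldl
      (fun (m : PySem.Dict Int Int) x => m.insert (PySem.List.pyGetD newArray x 0) (10 ^ x.toNat))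
      PySem.Dict.empty
  m.items

-- ===== PORT B =====
def class_replacement_alt (classArray : List Int) : List (Int × Int) :=
  -- first = {}; for idx, v in enumerate(classArray): first.setdefault(v, idx)
  let first := (PySem.List.enumerate classArray 0).foldl
      (fun (d : PySem.Dict Int Int) p => d.setdefault p.2 p.1) PySem.Dict.empty
  -- order = sorted(first, key=first.get)   (every key is present, so first.get = getD _ 0 on them)
  let order := PySem.List.sorted first.keys (fun v => first.getD v 0) false
  -- {v: 10 ** e for e, v in enumerate(order)}
  ((PySem.List.enumerate order 0).foldl
      (fun (d : PySem.Dict Int Int) p => d.insert p.2 (10 ^ p.1.toNat)) PySem.Dict.empty).items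

-- ===== PRECONDITION & SPEC =====
def Spec_class_replacement (classArray : List Int) (out : List (Int × Int)) : Prop := out = class_replacement_alt classArray
instance (classArray : List Int) (out : List (Int × Int)) : Decidable (Spec_class_replacement classArray out) := by unfold Spec_class_replacement; infer_instance

-- ===== CLAIM (what is proved, stated in full; the proofs are below) =====
def Claim_equal_class_replacement : Prop := ∀ (classArray : List Int), Dom_class_replacement classArray → Spec_class_replacement classArray (class_replacement classArray)

-- ===== LEMMAS AND PROOFS =====

-- A's inner exists-flag loop computes membership
lemma pvExistsFlag (i : Int) (L : List Int) (e0 : Int) :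
    L.foldl (fun e j => if i == j then 1 else e) e0 = if i ∈ L then 1 else e0 := by
  induction L generalizing e0 with
  | nil => simp
  | cons j t ih =>
    simp only [List.foldl_cons]
    by_cases h : (i == j) = true
    · rw [if_pos h, ih 1]; simp [beq_iff_eq.mp h]
    · rw [if_neg h, ih e0]; simp [show i ≠ j from by simpa using h]

lemma pvStepA_eq (L : List Int) (i : Int) :
    pvStepA L i = if i ∈ L then L else L ++ [i] := by
  unfold pvStepA
  cases L with
  | nil => simp
  | cons a t =>
    simp only [List.length_cons, pvExistsFlag]
    by_cases h : i ∈ a :: t <;> simp [h]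

-- A's phase-2 dict, formulated over List.range
def pvPhase2 (L : List Int) : PySem.Dict Int Int :=
  (List.range L.length).foldl (fun d i => d.insert (L.getD i 0) (10 ^ i)) PySem.Dict.empty

-- bridge: A's pyRange/pyGetD phase-2 loop IS pvPhase2 of the dedup list
lemma pvPhase2_bridge (L : List Int) :
    (PySem.List.pyRange 0 (L.length : Int) 1).foldl
      (fun (m : PySem.Dict Int Int) x => m.insert (PySem.List.pyGetD L x 0) (10 ^ x.toNat))
      PySem.Dict.empty = pvPhase2 L := by
  unfold pvPhase2
  rw [PySem.List.pyRange_zero_natCast, List.foldl_map]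
  apply PySem.List.foldl_congr_mem
  intro d i _
  rw [PySem.List.pyGetD_natCast]
  simp

-- pure model of B's first-index loop: (value, first index) pairs, given already-seen keys
def pvFirsts (s : Int) (seen : List Int) : List Int → List (Int × Int)
  | [] => []
  | x :: t => if x ∈ seen then pvFirsts (s + 1) seen t
              else (x, s) :: pvFirsts (s + 1) (seen ++ [x]) t

lemma pvFirstFold (xs : List Int) : ∀ (s : Int) (d : PySem.Dict Int Int),
    ((PySem.List.enumerate xs s).foldl (fun d p => d.setdefault p.2 p.1) d).items
      = d.items ++ pvFirsts s d.keys xs := by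
  induction xs with
  | nil => intro s d; simp [pvFirsts]
  | cons x t ih =>
    intro s d
    rw [PySem.List.enumerate_cons, List.foldl_cons]
    simp only
    by_cases hc : d.contains x = true
    · rw [PySem.Dict.setdefault_of_contains _ _ hc, ih]
      have hm : x ∈ d.keys := (PySem.Dict.contains_iff_mem_keys _ _).mp hc
      simp [pvFirsts, hm]
    · have hc' : d.contains x = false := by simpa using hc
      rw [PySem.Dict.setdefault_of_not_contains _ _ hc', ih]
      have hm : x ∉ d.keys := fun h => by
        rw [(PySem.Dict.contains_iff_mem_keys _ _).mpr h] at hc'; cases hc'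
      rw [PySem.Dict.items_insert_of_not_contains _ _ hc',
          PySem.Dict.keys_insert_of_not_contains _ _ hc']
      simp [pvFirsts, hm]

-- firsts' keys are exactly A's dedup fold continued from 'seen'
lemma pvFirsts_fst (xs : List Int) : ∀ (s : Int) (seen : List Int),
    seen ++ (pvFirsts s seen xs).map (·.1)
      = xs.foldl (fun L i => if i ∈ L then L else L ++ [i]) seen := by
  induction xs with
  | nil => intro s seen; simp [pvFirsts]
  | cons x t ih =>
    intro s seen
    by_cases h : x ∈ seen
    · simp [pvFirsts, h, ih]
    · simp only [pvFirsts, h, List.foldl_cons, if_false, List.map_cons]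
      rw [← ih (s + 1) (seen ++ [x])]
      simp
-- firsts' stored indices are ≥ s and strictly increasing along the list
lemma pvFirsts_snd (xs : List Int) : ∀ (s : Int) (seen : List Int),
    (∀ p ∈ pvFirsts s seen xs, s ≤ p.2) ∧ (pvFirsts s seen xs).Pairwise (fun p q => p.2 < q.2) := by
  induction xs with
  | nil => intro s seen; simp [pvFirsts]
  | cons x t ih =>
    intro s seen
    by_cases h : x ∈ seen
    · simp only [pvFirsts, h, if_true]
      refine ⟨fun p hp => ?_, (ih (s + 1) seen).2⟩
      have := (ih (s + 1) seen).1 p hp; omega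
    · simp only [pvFirsts, h, if_false, List.pairwise_cons]
      obtain ⟨h1, h2⟩ := ih (s + 1) (seen ++ [x])
      refine ⟨fun p hp => ?_, fun q hq => ?_, h2⟩
      · rcases List.mem_cons.mp hp with rfl | hp'
        · simp
        · have := h1 p hp'; omega
      · have := h1 q hq; change s < q.2; omega

-- firsts' keys avoid 'seen' and are themselves distinct
lemma pvFirsts_fst_nodup (xs : List Int) : ∀ (s : Int) (seen : List Int),
    (∀ p ∈ pvFirsts s seen xs, p.1 ∉ seen) ∧ ((pvFirsts s seen xs).map (·.1)).Nodup := by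
  induction xs with
  | nil => intro s seen; simp [pvFirsts]
  | cons x t ih =>
    intro s seen
    by_cases h : x ∈ seen
    · simp only [pvFirsts, h, if_true]; exact ih (s + 1) seen
    · simp only [pvFirsts, h, if_false, List.map_cons, List.nodup_cons]
      obtain ⟨h1, h2⟩ := ih (s + 1) (seen ++ [x])
      refine ⟨fun p hp => ?_, fun hx => ?_, h2⟩
      · rcases List.mem_cons.mp hp with rfl | hp'
        · exact h
        · intro hmem
          exact h1 p hp' (by simp [hmem])
      · rcases List.mem_map.mp hx with ⟨p, hp, hpe⟩
        exact h1 p hp (by simp [hpe])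

-- B's final comprehension over a list IS pvPhase2 of that list
lemma pvFinal (L : List Int) :
    ((PySem.List.enumerate L 0).foldl
      (fun (d : PySem.Dict Int Int) p => d.insert p.2 (10 ^ p.1.toNat)) PySem.Dict.empty)
      = pvPhase2 L := by
  unfold pvPhase2
  rw [PySem.List.enumerate_eq_map_pyRange (d := 0)]
  have hlen : PySem.List.len L = ((L.length : Nat) : Int) := by simp [PySem.List.len]
  rw [hlen, PySem.List.pyRange_zero_natCast, List.foldl_map, List.foldl_map]
  apply PySem.List.foldl_congr_mem
  intro d i _
  rw [PySem.List.pyGetD_natCast]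
  simp

-- ===== VERDICT (by name: the statement is the Claim_ definition above) =====
theorem class_replacement_spec : Claim_equal_class_replacement := by
  intro xs _
  unfold Spec_class_replacement class_replacement class_replacement_alt
  simp only
  -- name the first-occurrence pairs
  set F := pvFirsts 0 [] xs with hF
  have hitems : ((PySem.List.enumerate xs 0).foldl
      (fun (d : PySem.Dict Int Int) p => d.setdefault p.2 p.1) PySem.Dict.empty).items = F := by
    rw [pvFirstFold, hF]; rfl
  set first := (PySem.List.enumerate xs 0).foldl
      (fun (d : PySem.Dict Int Int) p => d.setdefault p.2 p.1) PySem.Dict.empty with hfirst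
  have hkeys : first.keys = F.map (·.1) := by
    simp only [PySem.Dict.keys, hitems]
  have hnodup : first.keys.Nodup := by
    rw [hkeys]; exact (pvFirsts_fst_nodup xs 0 []).2
  -- A's dedup list is F.map fst
  have hA : xs.foldl pvStepA [] = F.map (·.1) := by
    have hf : pvStepA = fun L i => if i ∈ L then L else L ++ [i] := by
      funext L i; exact pvStepA_eq L i
    rw [hf, ← pvFirsts_fst xs 0 []]; simp [hF]
  -- the key function returns the stored index on items of first
  have hgetD : ∀ p ∈ F, first.getD p.1 0 = p.2 := by
    intro p hp
    obtain ⟨k, v⟩ := p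
    exact PySem.Dict.getD_of_mem_items _ (by rw [hitems]; exact hp) hnodup 0
  -- the sort leaves first.keys unchanged: keys are strictly increasing under the key
  have hsorted : PySem.List.sorted first.keys (fun v => first.getD v 0) false = first.keys := by
    apply PySem.List.sorted_eq_of_perm_of_pairwise_lt _ _ _ (List.Perm.refl _)
    rw [hkeys, List.pairwise_map]
    have hpw := (pvFirsts_snd xs 0 []).2
    exact hpw.imp_of_mem (fun {p q} hp hq hlt => by
      simp only [hgetD p hp, hgetD q hq]; exact hlt)
  rw [hsorted, hA, pvPhase2_bridge, hkeys, pvFinal]
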